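-- pv_equiv track=rewrite | github.com/lamabalde/P5_Dev_Data | 002-Algo_python/TP Algo Python/exo8/fonc.py | modification
-- ===== SOURCE A (Python) =====
-- def modification(tab,c):
--     h=0
--     for i in range (len(tab)):
--         for j in tab[i]:
--             if j == c:
--                 h=i
--                 break
--     return h
-- ===== SOURCE B (Python) =====
-- def modification(tab, c):
--     for i in range(len(tab) - 1, -1, -1):
--         if c in tab[i]:
--             return i
--     return 0
-- ===== Notes on version B (the rewrite author's own statement) =====
-- stated objective: simpler
-- what changed: Backward scan from the last row returning the first row containing c immediately, instead of a full forward pass that keeps overwriting the last matching index.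
import Mathlib
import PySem

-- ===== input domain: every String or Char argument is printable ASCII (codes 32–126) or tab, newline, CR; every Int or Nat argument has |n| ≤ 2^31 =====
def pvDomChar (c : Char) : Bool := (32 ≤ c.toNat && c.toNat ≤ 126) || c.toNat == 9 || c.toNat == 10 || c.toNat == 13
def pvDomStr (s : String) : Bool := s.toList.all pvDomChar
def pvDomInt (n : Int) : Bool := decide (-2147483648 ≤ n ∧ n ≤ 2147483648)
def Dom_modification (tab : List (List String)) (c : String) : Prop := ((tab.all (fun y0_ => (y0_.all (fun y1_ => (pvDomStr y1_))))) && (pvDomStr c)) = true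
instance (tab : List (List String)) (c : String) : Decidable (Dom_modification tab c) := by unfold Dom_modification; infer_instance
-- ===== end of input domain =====

-- B replaces A's forward "remember the last matching row index" pass by a backward
-- search that returns the first row (from the end) containing c; same return value.

-- ===== PORT A =====
-- inner loop: 'for j in tab[i]: if j == c: h = i; break'
def modInnerA (row : List String) (c : String) (i : Int) (h : Int) : Int :=
  match row with
  | [] => h
  | j :: rest => if j == c then i else modInnerA rest c i h

def modification (tab : List (List String)) (c : String) : Int :=
  (PySem.List.enumerate tab).foldl (fun h p => modInnerA p.2 c p.1 h) 0

-- ===== PORT B =====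
-- 'for i in range(len(tab)-1, -1, -1): if c in tab[i]: return i' over indexed rows back-to-front
def altGoB (c : String) : List (Int × List String) → Int
  | [] => 0
  | p :: rest => if p.2.contains c then p.1 else altGoB c rest

def modification_alt (tab : List (List String)) (c : String) : Int :=
  altGoB c (PySem.List.enumerate tab).reverse

-- ===== PRECONDITION & SPEC =====
def Spec_modification (tab : List (List String)) (c : String) (out : Int) : Prop := out = modification_alt tab c
instance (tab : List (List String)) (c : String) (out : Int) : Decidable (Spec_modification tab c out) := by unfold Spec_modification; infer_instance

-- ===== CLAIM (what is proved, stated in full; the proofs are below) =====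
def Claim_equal_modification : Prop := ∀ (tab : List (List String)) (c : String), Dom_modification tab c → Spec_modification tab c (modification tab c)

-- ===== LEMMAS AND PROOFS =====

-- altGoB with an arbitrary default, to relate to the fold's accumulator
def altGoD (c : String) (l : List (Int × List String)) (h : Int) : Int :=
  match l with
  | [] => h
  | p :: rest => if p.2.contains c then p.1 else altGoD c rest h

theorem modInnerA_eq (row : List String) (c : String) (i h : Int) :
    modInnerA row c i h = if row.contains c then i else h := by
  induction row with
  | nil => simp [modInnerA]
  | cons j rest ih =>
    simp only [modInnerA, ih]
    by_cases hj : j = c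
    · simp [hj]
    · simp [beq_iff_eq, hj, Ne.symm hj]

theorem altGoB_eq_altGoD (c : String) (l : List (Int × List String)) :
    altGoB c l = altGoD c l 0 := by
  induction l with
  | nil => rfl
  | cons p rest ih => simp [altGoB, altGoD, ih]

theorem foldl_eq_altGoD (c : String) (l : List (Int × List String)) (h : Int) :
    l.foldl (fun h p => modInnerA p.2 c p.1 h) h = altGoD c l.reverse h := by
  induction l using List.reverseRecOn generalizing h with
  | nil => rfl
  | append_singleton l p ih =>
    rw [List.foldl_append, List.reverse_append]
    simp only [List.foldl_cons, List.foldl_nil, List.reverse_cons, List.reverse_nil,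
      List.nil_append, List.singleton_append, altGoD]
    rw [modInnerA_eq, ih]

-- ===== VERDICT (by name: the statement is the Claim_ definition above) =====
theorem modification_spec : Claim_equal_modification := by
  intro tab c _
  unfold Spec_modification modification modification_alt
  rw [foldl_eq_altGoD, altGoB_eq_altGoD]
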